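-- pv_equiv track=rewrite | github.com/sphillips-91/Python-Class | Assignment1_Rad_Template.py | find_motifs
-- ===== SOURCE A (Python) =====
-- def find_motifs(dna: str, motif: str) -> list[int]:
--     """
--     Task 3:
--     Implement the find_motifs function to take DNA sequence (string, as returned by your read_fasta function)
--     and a Restriction Enzyme motif (string) and will return a list of locations (integers) where the motif is found
--
--     :param dna: DNA sequence to be analyzed
--     :param motif: restriction enzyme motif
--     :return positions: list of ints of the motif positions
--     """
--
--     positions = []
--     start = 0
--
--     while True:
--         start = dna.find(motif, start)
--         if start == -1:
--             break
--         positions.append(start)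
--         start += len(motif)
--
--     return positions
-- ===== SOURCE B (Python) =====
-- def find_motifs(dna: str, motif: str) -> list[int]:
--     m = len(motif)
--     hits = [i for i in range(len(dna) - m + 1) if dna[i:i + m] == motif]
--     positions = []
--     next_ok = 0
--     for i in hits:
--         if i >= next_ok:
--             positions.append(i)
--             next_ok = i + m
--     return positions
-- ===== Notes on version B (the rewrite author's own statement) =====
-- stated objective: alternative
-- what changed: B is a two-stage algorithm: it first builds the complete list of ALL (possibly overlapping) match positions with a range comprehension, then a second pass greedily filters that list down to the non-overlapping ones with a next_ok threshold, whereas A interleaves searching and skipping in one str.find loop.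
import Mathlib
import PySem

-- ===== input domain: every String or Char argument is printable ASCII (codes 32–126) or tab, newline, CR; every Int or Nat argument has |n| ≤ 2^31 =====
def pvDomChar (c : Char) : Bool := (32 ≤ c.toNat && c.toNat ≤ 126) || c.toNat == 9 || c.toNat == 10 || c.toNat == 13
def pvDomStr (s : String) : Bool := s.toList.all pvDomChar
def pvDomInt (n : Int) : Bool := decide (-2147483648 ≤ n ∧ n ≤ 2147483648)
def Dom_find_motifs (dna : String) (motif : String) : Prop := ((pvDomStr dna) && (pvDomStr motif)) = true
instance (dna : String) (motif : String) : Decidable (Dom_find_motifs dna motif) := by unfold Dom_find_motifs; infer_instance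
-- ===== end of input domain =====

-- B replaces A's single str.find loop by two staged passes: a comprehension collecting ALL match
-- positions, then a separate greedy threshold filter keeping the non-overlapping ones (alternative
-- decomposition, same leftmost non-overlapping semantics; same asymptotic cost).


-- ===== PORT A =====
-- A's 'while True' loop: find the motif from 'start', stop at -1, else record and jump by len(motif).
-- Fuel s.length + 1 only makes the recursion total; inside Pre_ (motif ≠ "") it is never exhausted,
-- since each iteration advances start by len(motif) ≥ 1 and start stays ≤ len(dna).
def findLoopA (s pat : List Char) : Nat → Int → List Int
  | 0, _ => []
  | fuel + 1, start =>
    let start' := PySem.Chars.findFrom s pat start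
    if start' = -1 then []
    else start' :: findLoopA s pat fuel (start' + pat.length)

def find_motifs (dna : String) (motif : String) : List Int :=
  findLoopA dna.toList motif.toList (dna.toList.length + 1) 0

-- ===== PORT B =====
-- B stage 1: the comprehension [i for i in range(len(dna)-m+1) if dna[i:i+m] == motif] — ALL hits.
def allHits (s pat : List Char) : List Int :=
  (PySem.List.pyRange 0 ((s.length : Int) - (pat.length : Int) + 1) 1).filter
    (fun j => decide (PySem.List.slice s (some j) (some (j + (pat.length : Int))) = pat))

-- B stage 2: the for-loop over the hit list with the next_ok threshold accumulator.
def selectHits (m : Int) : List Int → Int → List Int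
  | [], _ => []
  | i :: rest, nextOk =>
    if nextOk ≤ i then i :: selectHits m rest (i + m) else selectHits m rest nextOk

def find_motifs_alt (dna : String) (motif : String) : List Int :=
  selectHits (motif.toList.length : Int) (allHits dna.toList motif.toList) 0

-- ===== PRECONDITION & SPEC =====
-- Pre_ excludes only the empty motif, on which A loops forever (str.find always succeeds and the
-- advance is 0), so A never returns there.
def Pre_find_motifs (dna : String) (motif : String) : Prop := motif ≠ ""
instance (dna : String) (motif : String) : Decidable (Pre_find_motifs dna motif) := by unfold Pre_find_motifs; infer_instance
def pvWitness_find_motifs : String × String := ("GAATTCGAATTC", "GAATTC")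

def Spec_find_motifs (dna : String) (motif : String) (out : List Int) : Prop := out = find_motifs_alt dna motif
instance (dna : String) (motif : String) (out : List Int) : Decidable (Spec_find_motifs dna motif out) := by unfold Spec_find_motifs; infer_instance

-- ===== CLAIM (what is proved, stated in full; the proofs are below) =====
def Claim_equal_find_motifs : Prop := ∀ (dna : String) (motif : String), Dom_find_motifs dna motif → Pre_find_motifs dna motif → Spec_find_motifs dna motif (find_motifs dna motif)

-- ===== LEMMAS AND PROOFS =====

-- Ghost greedy scan used only by the proof: the common shape both programs are reduced to.
def findLoopB (s pat : List Char) : Nat → Nat → List Int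
  | 0, _ => []
  | fuel + 1, i =>
    if i + pat.length ≤ s.length then
      if (s.drop i).take pat.length = pat then
        (i : Int) :: findLoopB s pat fuel (i + pat.length)
      else findLoopB s pat fuel (i + 1)
    else []

-- a match (pat is a prefix of s.drop p) fits inside s
lemma match_fits {s pat : List Char} {p : Nat} (hm : pat ≠ []) (h : pat <+: s.drop p) :
    p + pat.length ≤ s.length ∧ p < s.length := by
  have hlen := h.length_le
  simp only [List.length_drop] at hlen
  have hm1 : 1 ≤ pat.length := by
    cases pat with
    | nil => exact absurd rfl hm
    | cons a t => simp
  omega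

-- B's loop returns [] when no match exists at or after i
lemma loopB_no_match (s pat : List Char) :
    ∀ fb i, (∀ q, i ≤ q → ¬ pat <+: s.drop q) → findLoopB s pat fb i = [] := by
  intro fb
  induction fb with
  | zero => intro i _; rfl
  | succ fb ih =>
    intro i h
    simp only [findLoopB]
    split_ifs with h1 h2
    · exact absurd (List.prefix_iff_eq_take.mpr h2.symm) (h i le_rfl)
    · exact ih (i + 1) (fun q hq => h q (by omega))
    · rfl

-- B's loop skips over a match-free stretch [i, i+d)
lemma loopB_skip (s pat : List Char) :
    ∀ d fb i, i + d + pat.length ≤ s.length →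
      (∀ q, i ≤ q → q < i + d → ¬ pat <+: s.drop q) →
      d ≤ fb →
      findLoopB s pat fb i = findLoopB s pat (fb - d) (i + d) := by
  intro d
  induction d with
  | zero => intro fb i _ _ _; simp
  | succ d ih =>
    intro fb i hfit hno hfb
    cases fb with
    | zero => omega
    | succ fb =>
      simp only [findLoopB]
      have h1 : i + pat.length ≤ s.length := by omega
      rw [if_pos h1]
      have h2 : ¬ (s.drop i).take pat.length = pat := by
        intro hc
        exact hno i le_rfl (by omega) (List.prefix_iff_eq_take.mpr hc.symm)
      rw [if_neg h2]
      have := ih fb (i + 1) (by omega) (fun q hq hq' => hno q (by omega) (by omega)) (by omega)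
      simpa [Nat.succ_sub_succ, Nat.add_assoc, Nat.add_comm 1 d] using this

-- A = ghost greedy scan: from any start k ≤ len with enough fuel on both sides, the loops agree
lemma loops_agree (s pat : List Char) (hm : pat ≠ []) :
    ∀ c k fa fb, s.length + 1 - k ≤ c → k ≤ s.length →
      s.length + 1 - k ≤ fa → s.length + 1 - k ≤ fb →
      findLoopA s pat fa (k : Int) = findLoopB s pat fb k := by
  intro c
  induction c with
  | zero => intro k fa fb hc hk _ _; omega
  | succ c ih =>
    intro k fa fb hc hk hfa hfb
    have hm1 : 1 ≤ pat.length := by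
      cases pat with
      | nil => exact absurd rfl hm
      | cons a t => simp
    cases fa with
    | zero => omega
    | succ fa =>
      simp only [findLoopA]
      by_cases hfind : PySem.Chars.findFrom s pat (k : Int) = -1
      · rw [if_pos hfind]
        have hno := (PySem.Chars.findFrom_natCast_eq_neg_one_iff s pat k hk).mp hfind
        have hnoq : ∀ q, k ≤ q → ¬ pat <+: s.drop q := by
          intro q hq hpre
          apply hno
          have : pat <+: (s.drop k).drop (q - k) := by
            rw [List.drop_drop]
            have e : k + (q - k) = q := by omega
            rw [e]; exact hpre
          exact this.isInfix.trans (List.drop_suffix _ _).isInfix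
        exact (loopB_no_match s pat fb k hnoq).symm
      · rw [if_neg hfind]
        obtain ⟨hkle, hpre, hmin⟩ := PySem.Chars.findFrom_natCast_spec s pat k hk hfind
        set r := PySem.Chars.findFrom s pat (k : Int) with hr
        have hr0 : 0 ≤ r := le_trans (by exact_mod_cast Int.natCast_nonneg k) hkle
        have hrp : r = ((r.toNat : Nat) : Int) := (Int.toNat_of_nonneg hr0).symm
        set p := r.toNat with hp
        have hkp : k ≤ p := by omega
        obtain ⟨hfit, hplt⟩ := match_fits hm hpre
        have hskip := loopB_skip s pat (p - k) fb k (by omega)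
          (fun q hq hq' => hmin q hq (by omega)) (by omega)
        rw [hskip]
        have hkd : k + (p - k) = p := by omega
        rw [hkd]
        cases hfb' : fb - (p - k) with
        | zero => omega
        | succ fb' =>
          simp only [findLoopB]
          rw [if_pos hfit, if_pos ((List.prefix_iff_eq_take.mp hpre).symm)]
          rw [hrp]
          congr 1
          have hcast : ((p + pat.length : Nat) : Int) = (p : Int) + (pat.length : Int) := by push_cast; ring
          rw [← hcast]
          exact ih (p + pat.length) fa fb' (by omega) (by omega) (by omega) (by omega)

-- selectHits ignores which of two thresholds it carries if every list element clears both
lemma select_congr (m : Int) :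
    ∀ (l : List Int) (n n' : Int), (∀ x ∈ l, n ≤ x ∧ n' ≤ x) → selectHits m l n = selectHits m l n' := by
  intro l
  induction l with
  | nil => intro n n' _; rfl
  | cons x rest ih =>
    intro n n' h
    obtain ⟨h1, h2⟩ := h x (by simp)
    simp only [selectHits, if_pos h1, if_pos h2]

-- selectHits drops a prefix whose elements are all below the threshold
lemma select_skip (m : Int) :
    ∀ (l₁ l₂ : List Int) (n : Int), (∀ x ∈ l₁, x < n) → selectHits m (l₁ ++ l₂) n = selectHits m l₂ n := by
  intro l₁
  induction l₁ with
  | nil => intro l₂ n _; rfl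
  | cons x rest ih =>
    intro l₂ n h
    have hx : x < n := h x (by simp)
    simp only [List.cons_append, selectHits, if_neg (by omega : ¬ n ≤ x)]
    exact ih l₂ n (fun y hy => h y (by simp [hy]))

-- ghost greedy scan = B's staged passes, from any start index
lemma loopB_staged (s pat : List Char) (hm : pat ≠ []) :
    ∀ fb (i : Nat), s.length + 1 - i ≤ fb →
      findLoopB s pat fb i =
        selectHits (pat.length : Int)
          ((PySem.List.pyRange (i : Int) ((s.length : Int) - (pat.length : Int) + 1) 1).filter
            (fun j => decide (PySem.List.slice s (some j) (some (j + (pat.length : Int))) = pat)))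
          (i : Int) := by
  have hm1 : 1 ≤ pat.length := by
    cases pat with
    | nil => exact absurd rfl hm
    | cons a t => simp
  intro fb
  induction fb with
  | zero =>
    intro i h
    have hge : ((s.length : Int) - (pat.length : Int) + 1) ≤ (i : Int) := by omega
    simp [findLoopB, PySem.List.pyRange_one_eq_nil hge, selectHits]
  | succ fb ih =>
    intro i hfuel
    simp only [findLoopB]
    by_cases hin : i + pat.length ≤ s.length
    · rw [if_pos hin]
      have hin' : (i : Int) + (pat.length : Int) ≤ (s.length : Int) := by exact_mod_cast hin
      have hlt : (i : Int) < (s.length : Int) - (pat.length : Int) + 1 := by omega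
      rw [PySem.List.pyRange_one_cons hlt, List.filter_cons]
      have hslice : PySem.List.slice s (some (i : Int)) (some ((i : Int) + (pat.length : Int)))
          = (s.drop i).take pat.length := PySem.List.slice_natCast_add s i pat.length
      by_cases hmatch : (s.drop i).take pat.length = pat
      · have hd : (decide (PySem.List.slice s (some (i : Int)) (some ((i : Int) + (pat.length : Int))) = pat)) = true := by
          rw [hslice]; exact decide_eq_true hmatch
        rw [if_pos hmatch, hd, if_pos rfl]
        have hsel : selectHits (pat.length : Int)
            ((i : Int) :: (PySem.List.pyRange ((i : Int) + 1) ((s.length : Int) - (pat.length : Int) + 1) 1).filter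
              (fun j => decide (PySem.List.slice s (some j) (some (j + (pat.length : Int))) = pat)))
            (i : Int)
            = (i : Int) :: selectHits (pat.length : Int)
              ((PySem.List.pyRange ((i : Int) + 1) ((s.length : Int) - (pat.length : Int) + 1) 1).filter
                (fun j => decide (PySem.List.slice s (some j) (some (j + (pat.length : Int))) = pat)))
              ((i : Int) + (pat.length : Int)) := by
          simp only [selectHits, if_pos (le_refl (i : Int))]
        rw [hsel]
        congr 1
        have hIH := ih (i + pat.length) (by omega)
        have hc : (((i + pat.length : Nat)) : Int) = (i : Int) + (pat.length : Int) := by push_cast; ring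
        rw [hIH, hc]
        by_cases hN : (i : Int) + (pat.length : Int) ≤ (s.length : Int) - (pat.length : Int) + 1
        · rw [PySem.List.pyRange_one_append ((i : Int) + 1) ((i : Int) + (pat.length : Int))
              ((s.length : Int) - (pat.length : Int) + 1) (by omega) hN,
            List.filter_append]
          exact (select_skip ((pat.length : Int))
            ((PySem.List.pyRange ((i : Int) + 1) ((i : Int) + (pat.length : Int)) 1).filter
              (fun j => decide (PySem.List.slice s (some j) (some (j + (pat.length : Int))) = pat)))
            ((PySem.List.pyRange ((i : Int) + (pat.length : Int)) ((s.length : Int) - (pat.length : Int) + 1) 1).filter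
              (fun j => decide (PySem.List.slice s (some j) (some (j + (pat.length : Int))) = pat)))
            ((i : Int) + (pat.length : Int))
            (fun x hx => by
              have := PySem.List.mem_pyRange_one.mp (List.mem_of_mem_filter hx)
              omega)).symm
        · have he : PySem.List.pyRange ((i : Int) + (pat.length : Int)) ((s.length : Int) - (pat.length : Int) + 1) 1 = [] :=
            PySem.List.pyRange_one_eq_nil (by omega)
          rw [he]
          have hsk := select_skip ((pat.length : Int))
            ((PySem.List.pyRange ((i : Int) + 1) ((s.length : Int) - (pat.length : Int) + 1) 1).filter
              (fun j => decide (PySem.List.slice s (some j) (some (j + (pat.length : Int))) = pat)))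
            ([] : List Int) ((i : Int) + (pat.length : Int))
            (fun x hx => by
              have := PySem.List.mem_pyRange_one.mp (List.mem_of_mem_filter hx)
              omega)
          simpa using hsk.symm
      · have hd : (decide (PySem.List.slice s (some (i : Int)) (some ((i : Int) + (pat.length : Int))) = pat)) = false := by
          rw [hslice]; exact decide_eq_false hmatch
        rw [if_neg hmatch, hd, if_neg (by simp)]
        have hIH := ih (i + 1) (by omega)
        have hc : (((i + 1 : Nat)) : Int) = (i : Int) + 1 := by push_cast; ring
        rw [hIH, hc]
        exact (select_congr _ _ _ _ (fun x hx => by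
          have := PySem.List.mem_pyRange_one.mp (List.mem_of_mem_filter hx)
          omega)).symm
    · rw [if_neg hin]
      have he : PySem.List.pyRange (i : Int) ((s.length : Int) - (pat.length : Int) + 1) 1 = [] :=
        PySem.List.pyRange_one_eq_nil (by omega)
      rw [he]
      rfl

-- ===== VERDICT (by name: the statement is the Claim_ definition above) =====
theorem find_motifs_spec : Claim_equal_find_motifs := by
  intro dna motif _ hpre
  unfold Spec_find_motifs find_motifs find_motifs_alt allHits
  have hm : motif.toList ≠ [] := by
    intro h
    apply hpre
    have h2 : motif.toList = "".toList := by simpa using h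
    exact String.toList_inj.mp h2
  have h1 := loops_agree dna.toList motif.toList hm (dna.toList.length + 1) 0
    (dna.toList.length + 1) (dna.toList.length + 1) (by omega) (by omega) (by omega) (by omega)
  have h2 := loopB_staged dna.toList motif.toList hm (dna.toList.length + 1) 0 (by omega)
  simp only [Nat.cast_zero] at h1 h2
  rw [h1, h2]
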